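-- pv_equiv track=rewrite | github.com/tosoba/Grind | geeks_for_geeks/array/rotation/rotation_with_max_hamming_distance.py | find_max_hamming_distance
-- ===== SOURCE A (Python) =====
-- from typing import List
--
-- def find_max_hamming_distance(arr: List[int]) -> int:
--     max_hamming = 0
--     size = len(arr)
--
--     for i in range(1, size, 1):
--         current = 0
--         for j in range(size):
--             if arr[(i + j) % size] != arr[j]:
--                 current += 1
--         if current > max_hamming:
--             max_hamming = current
--
--     return max_hamming
-- ===== SOURCE B (Python) =====
-- from typing import List
--
-- def find_max_hamming_distance(arr: List[int]) -> int:
--     n = len(arr)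
--     match = [0] * n
--     for j in range(n):
--         for k in range(n):
--             if k != j and arr[k] == arr[j]:
--                 match[(k - j) % n] += 1
--     best = 0
--     for i in range(1, n):
--         best = max(best, n - match[i])
--     return best
-- ===== Notes on version B (the rewrite author's own statement) =====
-- stated objective: alternative
-- what changed: Instead of recomputing a mismatch count for every rotation, B makes one pass over all ordered index pairs with equal values, tallying a per-shift match histogram, and then reads the answer off as the maximum of n - match[i].
import Mathlib
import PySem

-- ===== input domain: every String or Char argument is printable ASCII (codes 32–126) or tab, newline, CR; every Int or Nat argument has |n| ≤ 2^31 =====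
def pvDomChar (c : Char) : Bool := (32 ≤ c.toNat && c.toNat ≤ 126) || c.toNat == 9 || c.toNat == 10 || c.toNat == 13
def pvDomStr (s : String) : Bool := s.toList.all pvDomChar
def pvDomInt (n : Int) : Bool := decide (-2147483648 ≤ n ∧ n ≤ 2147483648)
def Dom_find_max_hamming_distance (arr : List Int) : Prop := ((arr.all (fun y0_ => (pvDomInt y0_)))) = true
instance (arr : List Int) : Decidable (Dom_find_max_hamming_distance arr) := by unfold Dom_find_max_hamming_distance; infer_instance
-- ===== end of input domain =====

-- B replaces A's per-rotation mismatch recount by a single pass over all ordered index pairs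
-- with equal values, tallying a per-shift match histogram (alternative decomposition, same cost).


-- ===== PORT A =====
-- literal port of A; arr[(i+j) % size] and arr[j] are always in range when the loop body
-- runs (0 ≤ index < size = len arr), so the total pyGetD with default 0 is exact here
def find_max_hamming_distance (arr : List Int) : Int :=
  let size : Int := (arr.length : Int)
  (PySem.List.pyRange 1 size 1).foldl
    (fun max_hamming i =>
      let current : Int :=
        (PySem.List.pyRange 0 size 1).foldl
          (fun current j =>
            if PySem.List.pyGetD arr (PySem.Int.mod (i + j) size) 0 ≠ PySem.List.pyGetD arr j 0
            then current + 1 else current) 0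
      if current > max_hamming then current else max_hamming)
    0

-- ===== PORT B =====
-- literal port of Source B; all list indices are in range (0 ≤ (k-j) % n < n = len match),
-- so the total pyGetD/pySetD forms are exact here
def find_max_hamming_distance_alt (arr : List Int) : Int :=
  let n : Int := (arr.length : Int)
  let matchTbl : List Int :=
    (PySem.List.pyRange 0 n 1).foldl
      (fun m j =>
        (PySem.List.pyRange 0 n 1).foldl
          (fun m k =>
            if k ≠ j ∧ PySem.List.pyGetD arr k 0 = PySem.List.pyGetD arr j 0 then
              let t := PySem.Int.mod (k - j) n
              PySem.List.pySetD m t (PySem.List.pyGetD m t 0 + 1)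
            else m)
          m)
      (List.replicate arr.length (0 : Int))
  (PySem.List.pyRange 1 n 1).foldl
    (fun best i => max best (n - PySem.List.pyGetD matchTbl i 0)) 0

-- ===== PRECONDITION & SPEC =====
def Spec_find_max_hamming_distance (arr : List Int) (out : Int) : Prop := out = find_max_hamming_distance_alt arr
instance (arr : List Int) (out : Int) : Decidable (Spec_find_max_hamming_distance arr out) := by unfold Spec_find_max_hamming_distance; infer_instance

-- ===== CLAIM (what is proved, stated in full; the proofs are below) =====
def Claim_equal_find_max_hamming_distance : Prop := ∀ (arr : List Int), Dom_find_max_hamming_distance arr → Spec_find_max_hamming_distance arr (find_max_hamming_distance arr)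

-- ===== LEMMAS AND PROOFS =====

-- reading a bucket list after a single python-style increment at an in-range index
theorem pyGetD_pySetD_bump (m : List Int) (i t v : Int)
    (hi0 : 0 ≤ i) (hil : i < (m.length : Int)) (ht : 0 ≤ t) :
    PySem.List.pyGetD (PySem.List.pySetD m i v) t 0 =
      if t = i then v else PySem.List.pyGetD m t 0 := by
  have hi : i = ((i.toNat : Nat) : Int) := by omega
  have ht' : t = ((t.toNat : Nat) : Int) := by omega
  rw [hi, ht', PySem.List.pyGetD_pySetD_natCast _ _ _ _ _ (by omega)]
  by_cases h : t.toNat = i.toNat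
  · simp [h]
  · rw [if_neg h, if_neg (by omega)]

theorem bump_fold_entry (p : Int → Prop) [DecidablePred p] (f : Int → Int) :
    ∀ (l : List Int) (m : List Int) (t : Int), 0 ≤ t →
      (∀ x ∈ l, p x → 0 ≤ f x ∧ f x < (m.length : Int)) →
      PySem.List.pyGetD
        (l.foldl (fun m x => if p x then PySem.List.pySetD m (f x) (PySem.List.pyGetD m (f x) 0 + 1) else m) m) t 0
        = PySem.List.pyGetD m t 0 + (l.countP (fun x => decide (p x) && (f x == t)) : Int) := by
  intro l
  induction l with
  | nil => intro m t ht hb; simp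
  | cons x l ih =>
    intro m t ht hb
    simp only [List.foldl_cons, List.countP_cons]
    by_cases hp : p x
    · rw [if_pos hp]
      obtain ⟨h0, h1⟩ := hb x (List.mem_cons_self) hp
      rw [ih _ t ht (by
        intro y hy hpy
        have := hb y (List.mem_cons_of_mem _ hy) hpy
        simpa [PySem.List.length_pySetD] using this)]
      rw [pyGetD_pySetD_bump m (f x) t _ h0 h1 ht]
      by_cases hft : t = f x
      · simp [hft, hp]
        ring
      · simp [hft, hp, show ¬ (f x == t) = true from by simp; omega]
    · rw [if_neg hp]
      rw [ih _ t ht (fun y hy hpy => hb y (List.mem_cons_of_mem _ hy) hpy)]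
      simp [hp]

theorem bump_fold_length (p : Int → Prop) [DecidablePred p] (f : Int → Int) :
    ∀ (l : List Int) (m : List Int),
      (l.foldl (fun m x => if p x then PySem.List.pySetD m (f x) (PySem.List.pyGetD m (f x) 0 + 1) else m) m).length
        = m.length := by
  intro l
  induction l with
  | nil => intro m; rfl
  | cons x l ih =>
    intro m
    simp only [List.foldl_cons]
    by_cases hp : p x
    · rw [if_pos hp, ih, PySem.List.length_pySetD]
    · rw [if_neg hp, ih]
-- the nested pair loop of B: each bucket entry t accumulates, over the outer js,
-- the number of ks with equal value and shift (k-j) % n = t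
theorem table_outer (arr : List Int) :
  ∀ (L : List Int) (m : List Int) (t : Int), 0 ≤ t → m.length = arr.length →
  PySem.List.pyGetD
    (L.foldl (fun m j =>
      (PySem.List.pyRange 0 (arr.length : Int) 1).foldl
        (fun m k =>
          if k ≠ j ∧ PySem.List.pyGetD arr k 0 = PySem.List.pyGetD arr j 0 then
            PySem.List.pySetD m (PySem.Int.mod (k - j) (arr.length : Int))
              (PySem.List.pyGetD m (PySem.Int.mod (k - j) (arr.length : Int)) 0 + 1)
          else m) m) m) t 0
  = PySem.List.pyGetD m t 0 +
    (L.map (fun j =>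
      (((PySem.List.pyRange 0 (arr.length : Int) 1).countP
        (fun k => decide (k ≠ j ∧ PySem.List.pyGetD arr k 0 = PySem.List.pyGetD arr j 0)
          && (PySem.Int.mod (k - j) (arr.length : Int) == t))) : Int))).sum := by
  intro L
  induction L with
  | nil => intro m t ht hm; simp
  | cons j L ih =>
    intro m t ht hm
    simp only [List.foldl_cons, List.map_cons, List.sum_cons]
    have hbound : ∀ k ∈ PySem.List.pyRange 0 (arr.length : Int) 1,
        (k ≠ j ∧ PySem.List.pyGetD arr k 0 = PySem.List.pyGetD arr j 0) →
        0 ≤ PySem.Int.mod (k - j) (arr.length : Int) ∧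
        PySem.Int.mod (k - j) (arr.length : Int) < (m.length : Int) := by
      intro k hk _
      have hk' := PySem.List.mem_pyRange_one.mp hk
      have hN : (0:Int) < (arr.length : Int) := by omega
      refine ⟨PySem.Int.mod_nonneg _ hN, ?_⟩
      rw [hm]; exact PySem.Int.mod_lt _ hN
    rw [ih _ t ht (by
      rw [bump_fold_length (fun k => k ≠ j ∧ PySem.List.pyGetD arr k 0 = PySem.List.pyGetD arr j 0)
        (fun k => PySem.Int.mod (k - j) (arr.length : Int))]
      exact hm)]
    rw [bump_fold_entry (fun k => k ≠ j ∧ PySem.List.pyGetD arr k 0 = PySem.List.pyGetD arr j 0)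
        (fun k => PySem.Int.mod (k - j) (arr.length : Int)) _ m t ht hbound]
    ring

theorem inner_count (arr : List Int) (i j : Int)
    (h1 : 1 ≤ i) (h2 : i < (arr.length : Int)) (hj0 : 0 ≤ j) (hj1 : j < (arr.length : Int)) :
    ((PySem.List.pyRange 0 (arr.length : Int) 1).countP
        (fun k => decide (k ≠ j ∧ PySem.List.pyGetD arr k 0 = PySem.List.pyGetD arr j 0)
          && (PySem.Int.mod (k - j) (arr.length : Int) == i)))
      = if PySem.List.pyGetD arr (PySem.Int.mod (i + j) (arr.length : Int)) 0 = PySem.List.pyGetD arr j 0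
        then 1 else 0 := by
  have hN : (0:Int) < (arr.length : Int) := by omega
  set N : Int := (arr.length : Int) with hNdef
  set k₀ : Int := PySem.Int.mod (i + j) N with hk₀def
  have hk₀ : 0 ≤ k₀ ∧ k₀ < N := ⟨PySem.Int.mod_nonneg _ hN, PySem.Int.mod_lt _ hN⟩
  have hk₀e : k₀ = (i + j) % N := by rw [hk₀def, PySem.Int.mod_eq_emod_of_pos hN]
  have hmod : (k₀ - j) % N = i := by
    rw [hk₀e]
    have h3 : ((i + j) % N - j) % N = (i + j - j) % N := by
      rw [Int.sub_eq_add_neg, Int.sub_eq_add_neg, Int.emod_add_emod]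
    rw [h3]
    simp only [Int.add_sub_cancel]
    exact Int.emod_eq_of_lt (by omega) h2
  have hne : k₀ ≠ j := by
    intro h; rw [h] at hmod; simp at hmod; omega
  have key : ∀ k, 0 ≤ k → k < N →
      ((decide (k ≠ j ∧ PySem.List.pyGetD arr k 0 = PySem.List.pyGetD arr j 0)
          && (PySem.Int.mod (k - j) N == i))
        = ((k == k₀) && decide (PySem.List.pyGetD arr k₀ 0 = PySem.List.pyGetD arr j 0))) := by
    intro k hk0 hk1
    rw [PySem.Int.mod_eq_emod_of_pos hN]
    refine Bool.eq_iff_iff.mpr ?_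
    simp only [Bool.and_eq_true, decide_eq_true_eq, beq_iff_eq]
    constructor
    · rintro ⟨⟨-, he⟩, hm⟩
      have hk : k = k₀ := by
        have h3 : (k - j + j) % N = ((k - j) % N + j) % N := (Int.emod_add_emod _ _ _).symm
        rw [hm, ← hk₀e] at h3
        simp only [Int.sub_add_cancel] at h3
        rw [Int.emod_eq_of_lt hk0 hk1] at h3
        exact h3
      exact ⟨hk, hk ▸ he⟩
    · rintro ⟨rfl, he⟩
      exact ⟨⟨hne, he⟩, hmod⟩
  rw [List.countP_congr
      (q := fun k => (k == k₀) && decide (PySem.List.pyGetD arr k₀ 0 = PySem.List.pyGetD arr j 0))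
      (fun k hk => by
        have hk' := PySem.List.mem_pyRange_one.mp hk
        rw [key k hk'.1 hk'.2])]
  by_cases heq : PySem.List.pyGetD arr k₀ 0 = PySem.List.pyGetD arr j 0
  · rw [if_pos heq]
    have hfe : (fun k => ((k == k₀) && decide (PySem.List.pyGetD arr k₀ 0 = PySem.List.pyGetD arr j 0)))
        = (fun k => k == k₀) := by
      funext k; simp [heq]
    rw [hfe, ← List.count_eq_countP]
    exact List.count_eq_one_of_mem (PySem.List.nodup_pyRange_one _ _)
      (PySem.List.mem_pyRange_one.mpr (by omega))
  · simp [heq]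

theorem table_entry (arr : List Int) (i : Int) (h1 : 1 ≤ i) (h2 : i < (arr.length : Int)) :
    PySem.List.pyGetD
      ((PySem.List.pyRange 0 (arr.length : Int) 1).foldl (fun m j =>
        (PySem.List.pyRange 0 (arr.length : Int) 1).foldl
          (fun m k =>
            if k ≠ j ∧ PySem.List.pyGetD arr k 0 = PySem.List.pyGetD arr j 0 then
              PySem.List.pySetD m (PySem.Int.mod (k - j) (arr.length : Int))
                (PySem.List.pyGetD m (PySem.Int.mod (k - j) (arr.length : Int)) 0 + 1)
            else m) m)
        (List.replicate arr.length (0:Int))) i 0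
    = ((PySem.List.pyRange 0 (arr.length : Int) 1).countP
        (fun j => decide (PySem.List.pyGetD arr (PySem.Int.mod (i + j) (arr.length : Int)) 0
          = PySem.List.pyGetD arr j 0)) : Int) := by
  rw [table_outer arr _ _ i (by omega) (by simp)]
  have h0 : PySem.List.pyGetD (List.replicate arr.length (0:Int)) i 0 = 0 := by
    rw [show i = ((i.toNat : Nat) : Int) from by omega, PySem.List.pyGetD_natCast]
    simp [List.getD]
  rw [h0]
  rw [List.map_congr_left
      (g := fun j => if (decide (PySem.List.pyGetD arr (PySem.Int.mod (i + j) (arr.length : Int)) 0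
          = PySem.List.pyGetD arr j 0)) = true then (1:Int) else 0)
      (fun j hj => by
        have hj' := PySem.List.mem_pyRange_one.mp hj
        rw [inner_count arr i j h1 h2 hj'.1 hj'.2]
        by_cases hP : PySem.List.pyGetD arr (PySem.Int.mod (i + j) (arr.length : Int)) 0
            = PySem.List.pyGetD arr j 0 <;> simp [hP])]
  rw [PySem.List.sum_map_ite_one_zero]
  omega

theorem main_eq (arr : List Int) : find_max_hamming_distance arr = find_max_hamming_distance_alt arr := by
  simp only [find_max_hamming_distance, find_max_hamming_distance_alt]
  apply PySem.List.foldl_congr_mem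
  intro acc i hi
  have hi' := PySem.List.mem_pyRange_one.mp hi
  rw [PySem.List.foldl_ite_add_one]
  rw [table_entry arr i hi'.1 hi'.2]
  have hcompl : (PySem.List.pyRange 0 (arr.length : Int) 1).length
      = ((PySem.List.pyRange 0 (arr.length : Int) 1).countP
          (fun j => decide (PySem.List.pyGetD arr (PySem.Int.mod (i + j) (arr.length : Int)) 0
            = PySem.List.pyGetD arr j 0)))
        + ((PySem.List.pyRange 0 (arr.length : Int) 1).countP
          (fun j => decide (PySem.List.pyGetD arr (PySem.Int.mod (i + j) (arr.length : Int)) 0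
            ≠ PySem.List.pyGetD arr j 0))) := by
    rw [List.length_eq_countP_add_countP
      (fun j => decide (PySem.List.pyGetD arr (PySem.Int.mod (i + j) (arr.length : Int)) 0
        = PySem.List.pyGetD arr j 0))]
    congr 1
    apply List.countP_congr
    intro j hj
    simp
  have hlen : (PySem.List.pyRange 0 (arr.length : Int) 1).length = arr.length := by
    rw [PySem.List.length_pyRange_one]; omega
  rw [hlen] at hcompl
  simp only [gt_iff_lt, max_def]
  split_ifs <;> omega

-- ===== VERDICT (by name: the statement is the Claim_ definition above) =====
theorem find_max_hamming_distance_spec : Claim_equal_find_max_hamming_distance := by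
  intro arr _
  unfold Spec_find_max_hamming_distance
  exact main_eq arr
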